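-- pv_equiv track=rewrite | github.com/detrout/ooddr | ooddr/watch.py | read_watch_stream
-- ===== SOURCE A (Python) =====
-- def read_watch_stream(stream):
--     state = None
--
--     lines = []
--     for line in stream:
--         line = line.strip()
--         if len(line) == 0 or line.startswith('#'):
--             continue
--         if state == 'line-continue':
--             lines[-1] += line
--             state = None
--         else:
--             lines.append(line)
--
--         if line.endswith('\\'):
--             state = 'line-continue'
--             #chomp
--             lines[-1] = lines[-1][:-1]
--
--     return lines
-- ===== SOURCE B (Python) =====
-- def read_watch_stream(stream):
--     lines = []
--     pending = None
--     for raw in stream: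
--         line = raw.strip()
--         if len(line) == 0 or line.startswith('#'):
--             continue
--         if line.endswith('\\'):
--             pending = (pending if pending is not None else '') + line[:-1]
--         else:
--             lines.append((pending if pending is not None else '') + line)
--             pending = None
--     if pending is not None:
--         lines.append(pending)
--     return lines
-- ===== Notes on version B (the rewrite author's own statement) =====
-- stated objective: simpler
-- what changed: Replaced A's 'line-continue' state flag with in-place mutation of lines[-1] (append then chomp the stored element) by a pending accumulator buffer with a None sentinel that is appended only when a logical line completes and flushed after the loop.
import Mathlib
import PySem

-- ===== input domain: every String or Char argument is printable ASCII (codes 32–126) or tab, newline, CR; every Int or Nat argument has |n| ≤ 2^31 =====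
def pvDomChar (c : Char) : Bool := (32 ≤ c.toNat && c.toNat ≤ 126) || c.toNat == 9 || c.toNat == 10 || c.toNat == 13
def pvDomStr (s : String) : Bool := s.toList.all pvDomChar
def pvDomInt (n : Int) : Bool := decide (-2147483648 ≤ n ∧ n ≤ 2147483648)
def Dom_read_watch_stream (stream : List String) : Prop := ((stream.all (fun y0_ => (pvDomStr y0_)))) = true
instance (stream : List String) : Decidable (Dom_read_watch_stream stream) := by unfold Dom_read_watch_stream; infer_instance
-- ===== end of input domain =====

-- B replaces A's state flag + in-place mutation of lines[-1] with a single pending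
-- accumulator flushed on completion (objective: simpler decomposition, same cost).


-- ===== PORT A =====
-- A's loop: state flag ('line-continue'), lines list mutated in place
-- (lines[-1] += line, lines[-1] = lines[-1][:-1]).  Lines are handled as
-- List Char (PySem.Chars) and turned back into String at the end.
def readWatchGoA : List String → Bool → List (List Char) → List (List Char)
  | [], _, lines => lines
  | l :: rest, cont, lines =>
    let line := PySem.Chars.strip l.toList
    if line.length = 0 || PySem.Chars.startswith line ['#'] then
      readWatchGoA rest cont lines
    else
      -- if state == 'line-continue': lines[-1] += line; state = None
      -- else: lines.append(line)
      let lines1 := if cont then lines.dropLast ++ [lines.getLastD [] ++ line]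
                    else lines ++ [line]
      if PySem.Chars.endswith line ['\\'] then
        -- state = 'line-continue'; lines[-1] = lines[-1][:-1]
        readWatchGoA rest true
          (lines1.dropLast ++ [PySem.List.slice (lines1.getLastD []) none (some (-1))])
      else
        readWatchGoA rest false lines1

def read_watch_stream (stream : List String) : List String :=
  (readWatchGoA stream false []).map String.ofList

-- ===== PORT B =====
-- B's loop: a pending accumulator (None sentinel), flushed after the loop.
def readWatchGoB : List String → Option (List Char) → List (List Char) → List (List Char)
  | [], pending, acc =>
    match pending with
    | some p => acc ++ [p]
    | none => acc
  | l :: rest, pending, acc =>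
    let line := PySem.Chars.strip l.toList
    if line.length = 0 || PySem.Chars.startswith line ['#'] then
      readWatchGoB rest pending acc
    else if PySem.Chars.endswith line ['\\'] then
      readWatchGoB rest (some (pending.getD [] ++ line.dropLast)) acc
    else
      readWatchGoB rest none (acc ++ [pending.getD [] ++ line])

def read_watch_stream_alt (stream : List String) : List String :=
  (readWatchGoB stream none []).map String.ofList

-- ===== PRECONDITION & SPEC =====
def Spec_read_watch_stream (stream : List String) (out : List String) : Prop := out = read_watch_stream_alt stream
instance (stream : List String) (out : List String) : Decidable (Spec_read_watch_stream stream out) := by unfold Spec_read_watch_stream; infer_instance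

-- ===== CLAIM (what is proved, stated in full; the proofs are below) =====
def Claim_equal_read_watch_stream : Prop := ∀ (stream : List String), Dom_read_watch_stream stream → Spec_read_watch_stream stream (read_watch_stream stream)

-- ===== LEMMAS AND PROOFS =====

-- A's state (flag, lines) corresponds to B's (pending, acc) by
-- lines = acc ++ pending.toList and flag = pending.isSome.
theorem readWatchGo_agree (stream : List String) :
    ∀ (pending : Option (List Char)) (acc : List (List Char)),
      readWatchGoA stream pending.isSome (acc ++ pending.toList) =
        readWatchGoB stream pending acc := by
  induction stream with
  | nil =>
    intro pending acc
    cases pending <;> simp [readWatchGoA, readWatchGoB]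
  | cons l rest ih =>
    intro pending acc
    simp only [readWatchGoA, readWatchGoB]
    by_cases hskip : ((PySem.Chars.strip l.toList).length = 0
        || PySem.Chars.startswith (PySem.Chars.strip l.toList) ['#']) = true
    · simp only [hskip, if_true]
      exact ih pending acc
    · have hparts : ¬(PySem.Chars.strip l.toList).length = 0 ∧
          PySem.Chars.startswith (PySem.Chars.strip l.toList) ['#'] = false := by
        simpa [not_or] using hskip
      have hne : PySem.Chars.strip l.toList ≠ [] := by
        intro h
        exact hparts.1 (by simp [h])
      cases pending with
      | none =>
        by_cases hbs : PySem.Chars.endswith (PySem.Chars.strip l.toList) ['\\'] = true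
        · simpa [hne, hparts.2, hbs, PySem.List.slice_to_neg_one]
            using ih (some ((PySem.Chars.strip l.toList).dropLast)) acc
        · simpa [hne, hparts.2, hbs] using ih none (acc ++ [PySem.Chars.strip l.toList])
      | some p =>
        by_cases hbs : PySem.Chars.endswith (PySem.Chars.strip l.toList) ['\\'] = true
        · simpa [hne, hparts.2, hbs, PySem.List.slice_to_neg_one, List.dropLast_append_of_ne_nil hne]
            using ih (some (p ++ (PySem.Chars.strip l.toList).dropLast)) acc
        · simpa [hne, hparts.2, hbs] using ih none (acc ++ [p ++ PySem.Chars.strip l.toList])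

-- ===== VERDICT (by name: the statement is the Claim_ definition above) =====
theorem read_watch_stream_spec : Claim_equal_read_watch_stream := by
  intro stream _
  unfold Spec_read_watch_stream read_watch_stream read_watch_stream_alt
  rw [show ([] : List (List Char)) = [] ++ (none : Option (List Char)).toList from rfl,
    show false = (none : Option (List Char)).isSome from rfl,
    readWatchGo_agree]
  simp
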